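-- pv_equiv track=rewrite | github.com/phantomodm/aihuman | automated_data_pipeline/main.py | heuristic_map_to_standard
-- ===== SOURCE A (Python) =====
-- def heuristic_map_to_standard(data_item):
--     """
--     Takes a single data item and maps it to a standardized format
--     by guessing the field names based on keywords.
--     """
--     standard_item = {
--         'use_case': '',
--         'sample_script': ''
--     }
--
--     # Define a list of keywords to look for
--     use_case_keywords = ['usecase', 'use_case', 'context', 'purpose', 'domain']
--     script_keywords = ['script', 'sample', 'text', 'dialogue', 'response']
--
--     # Iterate through all keys in the data item
--     for key, value in data_item.items():
--         # Clean the key for comparison (e.g., lowercase and remove spaces)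
--         cleaned_key = key.lower().replace(' ', '_')
--
--         # Check if the key matches our keywords
--         if any(keyword in cleaned_key for keyword in use_case_keywords):
--             standard_item['use_case'] = value
--
--         if any(keyword in cleaned_key for keyword in script_keywords):
--             standard_item['sample_script'] = value
--
--     return standard_item
-- ===== SOURCE B (Python) =====
-- def heuristic_map_to_standard(data_item):
--     """Instead of a forward accumulating scan, normalize all keys once, then
--     search the entries BACK-TO-FRONT with early exit: the first match found in
--     the reversed list is exactly A's last-match-wins value ('' if none)."""
--     entries = [(k.lower().replace(' ', '_'), v) for k, v in data_item.items()]
--     entries.reverse()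
--
--     def first_match(keywords):
--         for cleaned_key, value in entries:
--             if any(kw in cleaned_key for kw in keywords):
--                 return value
--         return ''
--
--     return {
--         'use_case': first_match(['usecase', 'use_case', 'context', 'purpose', 'domain']),
--         'sample_script': first_match(['script', 'sample', 'text', 'dialogue', 'response']),
--     }
-- ===== Notes on version B (the rewrite author's own statement) =====
-- stated objective: alternative
-- what changed: B replaces A's forward accumulating scan (update both dict fields, last match wins) by a search: keys are normalized once into a reversed list and each field does an early-exit find of the FIRST matching entry in that reversed list, which equals A's last match.
import Mathlib
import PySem

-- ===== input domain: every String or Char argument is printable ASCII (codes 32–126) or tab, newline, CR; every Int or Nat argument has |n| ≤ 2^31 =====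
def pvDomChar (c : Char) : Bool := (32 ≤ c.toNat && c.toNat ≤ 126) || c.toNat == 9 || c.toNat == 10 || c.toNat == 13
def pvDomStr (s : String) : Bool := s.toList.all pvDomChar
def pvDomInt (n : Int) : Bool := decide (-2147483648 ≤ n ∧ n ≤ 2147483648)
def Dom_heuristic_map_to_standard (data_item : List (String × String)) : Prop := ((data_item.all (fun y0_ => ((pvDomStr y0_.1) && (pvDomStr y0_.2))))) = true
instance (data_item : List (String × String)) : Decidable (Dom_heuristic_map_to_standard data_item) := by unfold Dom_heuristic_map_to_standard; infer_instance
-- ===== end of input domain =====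

-- B replaces A's forward accumulating scan by a back-to-front early-exit search over once-normalized keys; same result, similar cost.

-- ===== PORT A =====
-- cleaned_key = key.lower().replace(' ', '_')
def pvClean (k : String) : String := PySem.Str.replace (PySem.Str.lower k) " " "_"

-- any(keyword in cleaned_key for keyword in kws)
def pvAnyKw (kws : List String) (ck : String) : Bool := kws.any (fun kw => PySem.Str.isIn kw ck)

def pvUcKws : List String := ["usecase", "use_case", "context", "purpose", "domain"]
def pvScKws : List String := ["script", "sample", "text", "dialogue", "response"]

def heuristic_map_to_standard (data_item : List (String × String)) : List (String × String) :=
  let standard_item : PySem.Dict String String :=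
    (PySem.Dict.empty.insert "use_case" "").insert "sample_script" ""
  let final := data_item.foldl (fun d kv =>
    let ck := pvClean kv.1
    let d := if pvAnyKw pvUcKws ck then d.insert "use_case" kv.2 else d
    if pvAnyKw pvScKws ck then d.insert "sample_script" kv.2 else d) standard_item
  final.items

-- ===== PORT B =====
-- entries: cleaned keys computed once, then reversed
def pvEntries (data_item : List (String × String)) : List (String × String) :=
  (data_item.map (fun kv => (pvClean kv.1, kv.2))).reverse

-- first_match: linear search with early exit, default ''
def pvFirstMatch (kws : List String) (entries : List (String × String)) : String :=
  match entries.find? (fun e => pvAnyKw kws e.1) with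
  | some e => e.2
  | none => ""

def heuristic_map_to_standard_alt (data_item : List (String × String)) : List (String × String) :=
  let entries := pvEntries data_item
  [("use_case", pvFirstMatch pvUcKws entries),
   ("sample_script", pvFirstMatch pvScKws entries)]

-- ===== PRECONDITION & SPEC =====
def Spec_heuristic_map_to_standard (data_item : List (String × String)) (out : List (String × String)) : Prop := out = heuristic_map_to_standard_alt data_item
instance (data_item : List (String × String)) (out : List (String × String)) : Decidable (Spec_heuristic_map_to_standard data_item out) := by unfold Spec_heuristic_map_to_standard; infer_instance

-- ===== CLAIM (what is proved, stated in full; the proofs are below) =====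
def Claim_equal_heuristic_map_to_standard : Prop := ∀ (data_item : List (String × String)), Dom_heuristic_map_to_standard data_item → Spec_heuristic_map_to_standard data_item (heuristic_map_to_standard data_item)

-- ===== LEMMAS AND PROOFS =====

-- loop invariant: A's fold keeps the dict in the two-entry shape, each entry
-- accumulating its field's last matching value
lemma pv_loop (l : List (String × String)) (u s : String) :
    (l.foldl (fun d kv =>
        let ck := pvClean kv.1
        let d := if pvAnyKw pvUcKws ck then d.insert "use_case" kv.2 else d
        if pvAnyKw pvScKws ck then d.insert "sample_script" kv.2 else d)
      (PySem.Dict.mk [("use_case", u), ("sample_script", s)])).items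
    = [("use_case", l.foldl (fun c kv => if pvAnyKw pvUcKws (pvClean kv.1) then kv.2 else c) u),
       ("sample_script", l.foldl (fun c kv => if pvAnyKw pvScKws (pvClean kv.1) then kv.2 else c) s)] := by
  induction l generalizing u s with
  | nil => rfl
  | cons kv rest ih =>
      have hstep : (let ck := pvClean kv.1
            let d := if pvAnyKw pvUcKws ck then
                (PySem.Dict.mk [("use_case", u), ("sample_script", s)]).insert "use_case" kv.2
              else PySem.Dict.mk [("use_case", u), ("sample_script", s)]
            if pvAnyKw pvScKws ck then d.insert "sample_script" kv.2 else d)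
          = PySem.Dict.mk
              [("use_case", if pvAnyKw pvUcKws (pvClean kv.1) then kv.2 else u),
               ("sample_script", if pvAnyKw pvScKws (pvClean kv.1) then kv.2 else s)] := by
        by_cases h1 : pvAnyKw pvUcKws (pvClean kv.1) = true <;>
          by_cases h2 : pvAnyKw pvScKws (pvClean kv.1) = true <;>
            simp [h1, h2, PySem.Dict.insert, PySem.Dict.contains]
      simp only [List.foldl_cons]
      rw [hstep, ih]

-- the last-match fold equals the first match of the reversed cleaned list
lemma pv_fold_eq_find (kws : List String) (l : List (String × String)) (init : String) :
    l.foldl (fun c kv => if pvAnyKw kws (pvClean kv.1) then kv.2 else c) init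
    = match ((l.map (fun kv => (pvClean kv.1, kv.2))).reverse.find?
        (fun e => pvAnyKw kws e.1)) with
      | some e => e.2
      | none => init := by
  induction l generalizing init with
  | nil => rfl
  | cons kv rest ih =>
      simp only [List.foldl_cons, List.map_cons, List.reverse_cons, List.find?_append]
      rw [ih]
      cases h : (rest.map (fun kv => (pvClean kv.1, kv.2))).reverse.find?
          (fun e => pvAnyKw kws e.1) with
      | some e => simp
      | none =>
          by_cases hm : pvAnyKw kws (pvClean kv.1) = true <;>
            simp [hm, List.find?]

-- ===== VERDICT (by name: the statement is the Claim_ definition above) =====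
theorem heuristic_map_to_standard_spec : Claim_equal_heuristic_map_to_standard := by
  intro data_item _
  unfold Spec_heuristic_map_to_standard heuristic_map_to_standard heuristic_map_to_standard_alt
    pvFirstMatch pvEntries
  have h0 : ((PySem.Dict.empty.insert "use_case" "").insert "sample_script" ""
      : PySem.Dict String String) = PySem.Dict.mk [("use_case", ""), ("sample_script", "")] := by decide
  simp only [h0, pv_loop data_item "" ""]
  rw [pv_fold_eq_find pvUcKws data_item "", pv_fold_eq_find pvScKws data_item ""]
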